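-- pv_equiv track=rewrite | github.com/YorkieB/psychic-parakeet | webx/webex/jarvis-voice-assistant/utils/helpers.py | detect_stop_words
-- ===== SOURCE A (Python) =====
-- from typing import Dict, List, Optional, Any, Tuple  # [NRS-810] Type hints
--
-- def detect_stop_words(text: str, stop_words: List[str] = None) -> bool:  # [NRS-810]
--     """Detect stop/exit words in text"""  # [NRS-810]
--     if not stop_words:  # [NRS-810]
--         stop_words = [  # [NRS-810]
--             "stop", "quit", "exit", "goodbye", "bye", "stop listening",  # [NRS-810]
--             "end session", "turn off", "sleep", "shutdown"  # [NRS-810]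
--         ]  # [NRS-810]
--
--     text_lower = text.lower().strip()  # [NRS-810]
--     return any(stop_word in text_lower for stop_word in stop_words)  # [NRS-810]
-- ===== SOURCE B (Python) =====
-- _DEFAULT_STOP_WORDS = [
--     "stop", "quit", "exit", "goodbye", "bye", "stop listening",
--     "end session", "turn off", "sleep", "shutdown"
-- ]
--
-- def detect_stop_words(text, stop_words=None):
--     """Detect stop/exit words in text via a set of words and a window sweep
--     per distinct word length (hash lookup replaces per-word substring scans)."""
--     if not stop_words:
--         stop_words = _DEFAULT_STOP_WORDS
--     t = text.lower().strip()
--     words = set(stop_words)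
--     lengths = set(len(w) for w in stop_words)
--     n = len(t)
--     for L in lengths:
--         for i in range(n - L + 1):
--             if t[i:i + L] in words:
--                 return True
--     return False
-- ===== Notes on version B (the rewrite author's own statement) =====
-- stated objective: alternative
-- what changed: Replaces the word-major loop (one full substring-membership scan per stop word) by a hash-set of the stop words plus, for each distinct word length, one window sweep over the text testing each window by set lookup.
import Mathlib
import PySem

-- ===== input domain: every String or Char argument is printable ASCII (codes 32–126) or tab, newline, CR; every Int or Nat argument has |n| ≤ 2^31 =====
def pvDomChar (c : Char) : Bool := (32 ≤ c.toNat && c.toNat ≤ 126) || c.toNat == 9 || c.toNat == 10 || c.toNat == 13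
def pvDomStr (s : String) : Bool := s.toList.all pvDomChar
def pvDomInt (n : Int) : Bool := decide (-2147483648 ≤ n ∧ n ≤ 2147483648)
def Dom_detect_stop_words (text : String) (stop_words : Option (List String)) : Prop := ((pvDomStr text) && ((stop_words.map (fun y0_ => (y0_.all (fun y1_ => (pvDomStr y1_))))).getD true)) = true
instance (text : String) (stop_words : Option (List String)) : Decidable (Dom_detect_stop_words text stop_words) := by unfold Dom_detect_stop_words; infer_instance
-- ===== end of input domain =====

-- B replaces the word-major substring loop by a stop-word hash-set and one window sweep per distinct word length (alternative algorithm, same results).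


-- ===== PORT A =====
-- default stop-word list of A (the inline literal assigned when `not stop_words`)
def pvDefaultStopWords_A : List String :=
  ["stop", "quit", "exit", "goodbye", "bye", "stop listening",
   "end session", "turn off", "sleep", "shutdown"]

def detect_stop_words (text : String) (stop_words : Option (List String)) : Bool :=
  -- `if not stop_words:` — None or the empty list both take the default
  let sw : List String :=
    match stop_words with
    | none => pvDefaultStopWords_A
    | some l => if l = [] then pvDefaultStopWords_A else l
  let text_lower := PySem.Str.strip (PySem.Str.lower text)
  sw.any (fun stop_word => PySem.Str.isIn stop_word text_lower)

-- ===== PORT B =====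
-- the same default literal, as B's module constant
def pvDefaultStopWords_B : List String :=
  ["stop", "quit", "exit", "goodbye", "bye", "stop listening",
   "end session", "turn off", "sleep", "shutdown"]

def detect_stop_words_alt (text : String) (stop_words : Option (List String)) : Bool :=
  let sw : List String :=
    match stop_words with
    | none => pvDefaultStopWords_B
    | some l => if l = [] then pvDefaultStopWords_B else l
  let t : List Char := PySem.Chars.strip (PySem.Chars.lower text.toList)
  -- words = set(stop_words); lengths = set(len(w) for w in stop_words)  (strings as char lists)
  let words : PySem.Set (List Char) := PySem.Set.ofList (sw.map String.toList)
  let lengths : PySem.Set Int := PySem.Set.ofList (sw.map (fun w => (w.toList.length : Int)))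
  let n : Int := t.length
  -- for L in lengths: for i in range(n - L + 1): if t[i:i+L] in words: return True
  lengths.any (fun L =>
    (PySem.List.pyRange 0 (n - L + 1) 1).any (fun i =>
      words.contains (PySem.List.slice t (some i) (some (i + L)))))

-- ===== PRECONDITION & SPEC =====
def Spec_detect_stop_words (text : String) (stop_words : Option (List String)) (out : Bool) : Prop := out = detect_stop_words_alt text stop_words
instance (text : String) (stop_words : Option (List String)) (out : Bool) : Decidable (Spec_detect_stop_words text stop_words out) := by unfold Spec_detect_stop_words; infer_instance

-- ===== CLAIM (what is proved, stated in full; the proofs are below) =====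
def Claim_equal_detect_stop_words : Prop := ∀ (text : String) (stop_words : Option (List String)), Dom_detect_stop_words text stop_words → Spec_detect_stop_words text stop_words (detect_stop_words text stop_words)

-- ===== LEMMAS AND PROOFS =====

-- word-major substring search equals the per-length window sweep with set membership
theorem any_isIn_eq_window_sweep (sw : List String) (t : List Char) :
    sw.any (fun stop_word => PySem.Chars.isIn stop_word.toList t)
      = (PySem.Set.ofList (sw.map (fun w => (w.toList.length : Int)))).any (fun L =>
          (PySem.List.pyRange 0 ((t.length : Int) - L + 1) 1).any (fun i =>
            (PySem.Set.ofList (sw.map String.toList)).contains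
              (PySem.List.slice t (some i) (some (i + L))))) := by
  rw [Bool.eq_iff_iff]
  simp only [List.any_eq_true, PySem.Set.mem_ofList, List.mem_map,
    PySem.List.mem_pyRange_one, PySem.Set.contains_iff]
  constructor
  · rintro ⟨w, hw, hin⟩
    obtain ⟨j, hj⟩ := (PySem.Chars.exists_prefix_drop_iff_isIn w.toList t).2 hin
    -- move to an offset j' ≤ t.length with the same prefix fact
    have hj' : w.toList <+: t.drop (min j t.length) := by
      by_cases h : j ≤ t.length
      · simpa [Nat.min_eq_left h] using hj
      · have hnil : t.drop j = [] := List.drop_eq_nil_of_le (by omega)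
        have : w.toList = [] := List.prefix_nil.1 (hnil ▸ hj)
        simp [this]
    have hlen : w.toList.length ≤ t.length - min j t.length := by
      simpa using hj'.length_le.trans (by simp)
    refine ⟨(w.toList.length : Int), ⟨w, hw, rfl⟩,
      ((min j t.length : Nat) : Int), ⟨by positivity, by push_cast; omega⟩, ?_⟩
    have hslice : PySem.List.slice t (some ((min j t.length : Nat) : Int))
        (some (((min j t.length : Nat) : Int) + (w.toList.length : Int)))
          = (t.drop (min j t.length)).take w.toList.length :=
      PySem.List.slice_natCast_add t (min j t.length) w.toList.length
    exact ⟨w, hw, by rw [hslice, ← List.prefix_iff_eq_take.1 hj']⟩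
  · rintro ⟨L, ⟨w0, -, hL⟩, i, ⟨hi0, -⟩, w, hw, hwin⟩
    subst hL
    refine ⟨w, hw, (PySem.Chars.exists_prefix_drop_iff_isIn w.toList t).1 ⟨i.toNat, ?_⟩⟩
    have hsl : PySem.List.slice t (some i) (some (i + (w0.toList.length : Int)))
        = (t.drop i.toNat).take ((i + (w0.toList.length : Int)).toNat - i.toNat) :=
      PySem.List.slice_toNat t hi0 (by omega)
    rw [hwin, hsl]
    exact List.take_prefix _ _

-- ===== VERDICT (by name: the statement is the Claim_ definition above) =====
theorem detect_stop_words_spec : Claim_equal_detect_stop_words := by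
  intro text stop_words _
  unfold Spec_detect_stop_words detect_stop_words detect_stop_words_alt
  have hbridge : (PySem.Str.strip (PySem.Str.lower text)).toList
      = PySem.Chars.strip (PySem.Chars.lower text.toList) := by
    simp [pysem]
  cases stop_words with
  | none =>
      simpa [pvDefaultStopWords_A, pvDefaultStopWords_B, PySem.Str.isIn, hbridge]
        using any_isIn_eq_window_sweep pvDefaultStopWords_A
          (PySem.Chars.strip (PySem.Chars.lower text.toList))
  | some l =>
      by_cases hl : l = [] <;>
        simpa [hl, pvDefaultStopWords_A, pvDefaultStopWords_B, PySem.Str.isIn, hbridge]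
          using any_isIn_eq_window_sweep (if l = [] then pvDefaultStopWords_A else l)
            (PySem.Chars.strip (PySem.Chars.lower text.toList))
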